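-- pv_equiv track=rewrite | github.com/bengo501/projeto_e_otimiza-o_de_algoritmos | contagem_regressiva.py | validar_sequencia
-- ===== SOURCE A (Python) =====
-- from typing import Dict, List, Tuple, Optional
--
-- def validar_sequencia(n: int, sequencia: List[str]) -> bool:
--     """
--     valida se uma sequencia de operacoes realmente leva de n ate 1.
--
--     esta funcao simula a aplicacao das operacoes da sequencia sobre o valor n
--     e verifica se o resultado final e realmente 1. tambem valida se as
--     operacoes de divisao sao aplicadas apenas quando o valor e divisivel.
--
--     parametros:
--         n (int): valor inicial
--         sequencia (list): lista de operacoes a serem aplicadas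
--
--     retorna:
--         bool: true se a sequencia e valida, false caso contrario
--     """
--     # comeca com o valor inicial n
--     valor = n
--
--     # aplica cada operacao da sequencia sobre o valor atual
--     for op in sequencia:
--         if op == '-1':
--             # operacao de decremento: subtrai 1 do valor
--             valor -= 1
--         elif op == '/2':
--             # operacao de divisao por 2: verifica se valor e par
--             if valor % 2 != 0:
--                 # se valor nao e par, a operacao nao e valida
--                 return False
--             valor //= 2  # divide o valor por 2
--         elif op == '/3':
--             # operacao de divisao por 3: verifica se valor e divisivel por 3
--             if valor % 3 != 0:
--                 # se valor nao e divisivel por 3, a operacao nao e valida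
--                 return False
--             valor //= 3  # divide o valor por 3
--
--     # verifica se o valor final e realmente 1
--     return valor == 1
-- ===== SOURCE B (Python) =====
-- def validar_sequencia(n, sequencia):
--     # Walk the sequence backwards from the target 1, applying exact inverses;
--     # the sequence is valid iff the reconstructed preimage equals n.
--     valor = 1
--     for op in reversed(sequencia):
--         if op == '-1':
--             valor += 1
--         elif op == '/2':
--             valor *= 2
--         elif op == '/3':
--             valor *= 3
--     return valor == n
-- ===== Notes on version B (the rewrite author's own statement) =====
-- stated objective: alternative
-- what changed: B replaces A's forward simulation with divisibility checks and early returns by a backward pass: it reconstructs the unique preimage of 1 under the reversed sequence of exact inverse operations and compares it with n.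
import Mathlib
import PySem

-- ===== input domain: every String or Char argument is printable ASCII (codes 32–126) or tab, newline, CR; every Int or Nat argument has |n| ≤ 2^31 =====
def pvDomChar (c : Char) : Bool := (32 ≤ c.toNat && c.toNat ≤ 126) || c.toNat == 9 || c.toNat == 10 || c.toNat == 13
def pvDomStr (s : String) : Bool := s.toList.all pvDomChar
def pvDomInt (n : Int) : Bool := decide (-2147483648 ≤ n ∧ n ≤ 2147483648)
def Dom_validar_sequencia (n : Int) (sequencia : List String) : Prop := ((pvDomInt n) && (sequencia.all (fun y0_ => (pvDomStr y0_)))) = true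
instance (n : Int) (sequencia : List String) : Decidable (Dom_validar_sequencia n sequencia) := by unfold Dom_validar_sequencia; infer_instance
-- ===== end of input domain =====

-- B replaces A's forward simulation (with divisibility checks and early returns) by a
-- backward reconstruction of the unique preimage of 1, compared with n; same cost, no speed claim.

-- ===== PORT A =====
-- A's loop with early returns, as structural recursion over the sequence carrying 'valor'
def vsLoopA (valor : Int) (l : List String) : Bool :=
  match l with
  | [] => valor == 1
  | op :: rest =>
    if op = "-1" then
      vsLoopA (valor - 1) rest
    else if op = "/2" then
      if PySem.Int.mod valor 2 ≠ 0 then false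
      else vsLoopA (PySem.Int.floordiv valor 2) rest
    else if op = "/3" then
      if PySem.Int.mod valor 3 ≠ 0 then false
      else vsLoopA (PySem.Int.floordiv valor 3) rest
    else vsLoopA valor rest

def validar_sequencia (n : Int) (sequencia : List String) : Bool :=
  vsLoopA n sequencia

-- ===== PORT B =====
def validar_sequencia_alt (n : Int) (sequencia : List String) : Bool :=
  (sequencia.reverse.foldl
    (fun valor op =>
      if op = "-1" then valor + 1
      else if op = "/2" then valor * 2
      else if op = "/3" then valor * 3
      else valor) 1) == n

-- ===== PRECONDITION & SPEC =====
def Spec_validar_sequencia (n : Int) (sequencia : List String) (out : Bool) : Prop := out = validar_sequencia_alt n sequencia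
instance (n : Int) (sequencia : List String) (out : Bool) : Decidable (Spec_validar_sequencia n sequencia out) := by unfold Spec_validar_sequencia; infer_instance

-- ===== CLAIM (what is proved, stated in full; the proofs are below) =====
def Claim_equal_validar_sequencia : Prop := ∀ (n : Int) (sequencia : List String), Dom_validar_sequencia n sequencia → Spec_validar_sequencia n sequencia (validar_sequencia n sequencia)

-- ===== LEMMAS AND PROOFS =====
theorem vsLoopA_eq_foldr (l : List String) (v : Int) :
    vsLoopA v l =
      (l.foldr
        (fun op acc =>
          if op = "-1" then acc + 1
          else if op = "/2" then acc * 2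
          else if op = "/3" then acc * 3
          else acc) 1 == v) := by
  induction l generalizing v with
  | nil => simp [vsLoopA, eq_comm]
  | cons op rest ih =>
    simp only [vsLoopA, List.foldr]
    split_ifs with h1 h2 h3 h4 h5
    · rw [ih (v - 1), Bool.eq_iff_iff]; simp only [beq_iff_eq]; omega
    · -- '/2', valor odd: preimage r*2 is even, cannot equal v
      rw [PySem.Int.mod_eq_emod_of_pos (by omega : (0:Int) < 2)] at h3
      rw [Bool.eq_iff_iff]; simp only [beq_iff_eq, Bool.false_eq_true, false_iff]
      intro h; omega
    · rw [PySem.Int.mod_eq_emod_of_pos (by omega : (0:Int) < 2)] at h3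
      rw [PySem.Int.floordiv_eq_ediv_of_pos (by omega : (0:Int) < 2)]
      push Not at h3
      rw [ih, Bool.eq_iff_iff]; simp only [beq_iff_eq]
      constructor <;> intro h <;> omega
    · rw [PySem.Int.mod_eq_emod_of_pos (by omega : (0:Int) < 3)] at h5
      rw [Bool.eq_iff_iff]; simp only [beq_iff_eq, Bool.false_eq_true, false_iff]
      intro h; omega
    · rw [PySem.Int.mod_eq_emod_of_pos (by omega : (0:Int) < 3)] at h5
      rw [PySem.Int.floordiv_eq_ediv_of_pos (by omega : (0:Int) < 3)]
      push Not at h5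
      rw [ih, Bool.eq_iff_iff]; simp only [beq_iff_eq]
      constructor <;> intro h <;> omega
    · exact ih v

-- ===== VERDICT (by name: the statement is the Claim_ definition above) =====
theorem validar_sequencia_spec : Claim_equal_validar_sequencia := by
  intro n sequencia _
  unfold Spec_validar_sequencia validar_sequencia validar_sequencia_alt
  rw [List.foldl_reverse, vsLoopA_eq_foldr]
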